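-- pv_equiv track=rewrite | github.com/Hal-ws/programmers | 12927.py | solution
-- ===== SOURCE A (Python) =====
-- def solution(n, works):
--     answer = 0
--     left, right = 0, max(works)
--     while left <= right:
--         mid = (left + right) // 2 # 최대로 남은 작업량이 mid만큼 되도록 한다
--         usedT = 0
--         for amount in works:
--             if mid <= amount:
--                 usedT += (amount - mid)
--         if usedT <= n: # 가능함
--             maxAmout = mid
--             right = mid - 1 # 좀 더 일하게 한다
--         else:
--             left = mid + 1 # 좀 덜 일하게 한다
--     usedT = 0
--     for i in range(len(works)):
--         if works[i] >= maxAmout: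
--             usedT += (works[i] - maxAmout)
--             works[i] = maxAmout
--     works.sort(reverse=True)
--     leftT = n - usedT
--     for i in range(len(works)):
--         if leftT > 0:
--             if works[i] > 0:
--                 works[i] -= 1
--                 leftT -= 1
--         else:
--             break
--     for i in range(len(works)):
--         answer += pow(works[i], 2)
--     return answer
-- ===== SOURCE B (Python) =====
-- def solution(n, works):
--     # Water-filling: sort the positive workloads descending, find the minimal
--     # remaining cap m by closed-form over each linear segment of the cost
--     # function, then return the answer arithmetically (no binary search,
--     # no per-element mutation).  Note: A also sorts/mutates `works` in place;
--     # B leaves `works` untouched (the proved equivalence is about the return value).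
--     ps = sorted((w for w in works if w > 0), reverse=True)
--     m, k, P = 0, 0, 0
--     for i in range(len(ps)):
--         P += ps[i]
--         lo = ps[i + 1] if i + 1 < len(ps) else 0
--         if P - (i + 1) * lo > n:
--             k = i + 1
--             m = -((n - P) // k)      # ceil((P - n) / k)
--             break
--     base = sum(w * w for w in works if w < m)
--     if m == 0:
--         return base
--     extra = n - (P - k * m)          # leftover single decrements
--     return base + (k - extra) * m * m + extra * (m - 1) * (m - 1)
-- ===== Notes on version B (the rewrite author's own statement) =====
-- stated objective: alternative
-- what changed: Replaces A's binary search over the cap (a full cost scan per probe) plus in-place clamp/sort/decrement passes with one water-filling scan over the descending-sorted positive workloads that finds the cap in closed form by ceiling division and returns the sum of squares arithmetically (B does not mutate `works`; A sorts it in place).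
-- outside the precondition, e.g. on solution(-1, [3, 2]): A raises NameError, B returns 29; on solution(2, []): A raises ValueError, B returns 0; on solution(2, [-5, -1]): A raises NameError, B returns 26
import Mathlib
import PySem

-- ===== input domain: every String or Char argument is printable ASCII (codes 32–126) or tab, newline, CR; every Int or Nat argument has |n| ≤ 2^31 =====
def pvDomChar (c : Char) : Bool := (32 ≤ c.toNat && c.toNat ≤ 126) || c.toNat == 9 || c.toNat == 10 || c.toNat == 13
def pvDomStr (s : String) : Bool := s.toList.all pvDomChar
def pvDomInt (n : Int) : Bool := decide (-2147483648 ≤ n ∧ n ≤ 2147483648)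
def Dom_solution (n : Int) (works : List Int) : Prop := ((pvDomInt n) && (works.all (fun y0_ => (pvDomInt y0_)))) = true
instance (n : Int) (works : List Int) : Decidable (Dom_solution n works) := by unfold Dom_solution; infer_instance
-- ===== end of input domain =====

-- B replaces A's binary search + in-place clamp/sort/decrement with a closed-form
-- water-filling pass over the sorted positive workloads; A mutates `works` in place,
-- B does not: the equivalence proved here is about the return value only.

-- ===== PORT A =====
-- the 'while left <= right' binary search; acc is maxAmout (none = name never bound)
def solnBS (n : Int) (works : List Int) (left right : Int) (acc : Option Int) : Option Int :=
  if h : left ≤ right then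
    let mid := PySem.Int.floordiv (left + right) 2
    let usedT := works.foldl (fun usedT amount => if mid ≤ amount then usedT + (amount - mid) else usedT) 0
    if usedT ≤ n then solnBS n works left (mid - 1) (some mid)
    else solnBS n works (mid + 1) right acc
  else acc
termination_by (right + 1 - left).toNat
decreasing_by
  · have := PySem.Int.floordiv_two_mid_bounds h; omega
  · have := PySem.Int.floordiv_two_mid_bounds h; omega

-- the third loop: decrement while leftT > 0, 'break' leaves the rest unchanged
def solnDec : List Int → Int → List Int
  | [], _ => []
  | w :: ws, leftT =>
    if 0 < leftT then
      if 0 < w then (w - 1) :: solnDec ws (leftT - 1) else w :: solnDec ws leftT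
    else w :: ws

def solution (n : Int) (works : List Int) : Int :=
  match PySem.List.max? works (fun x => x) with
  | none => 0      -- Python: max(works) raises ValueError on []; excluded by Pre_
  | some mx =>
    match solnBS n works 0 mx none with
    | none => 0    -- Python: NameError, maxAmout never bound; excluded by Pre_
    | some maxAmout =>
      -- second loop: clamp works[i] to maxAmout, accumulating usedT
      let p := works.foldl (fun (p : Int × List Int) w =>
        if maxAmout ≤ w then (p.1 + (w - maxAmout), p.2 ++ [maxAmout]) else (p.1, p.2 ++ [w])) (0, [])
      let ws2 := PySem.List.sorted p.2 (fun x => x) true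
      let leftT := n - p.1
      (solnDec ws2 leftT).foldl (fun answer w => answer + w ^ 2) 0

-- ===== PORT B =====
-- scan the sorted positive workloads; on the first segment whose low end is
-- infeasible, return the cap by ceiling division (m, k, P)
def altFind (n : Int) : List Int → Int → Int → Int × Int × Int
  | [], _, P => (0, 0, P)
  | p :: rest, i, P =>
    let P' := P + p
    let lo := rest.headD 0
    if n < P' - (i + 1) * lo then
      (-(PySem.Int.floordiv (n - P') (i + 1)), i + 1, P')
    else altFind n rest (i + 1) P'

def solution_alt (n : Int) (works : List Int) : Int :=
  let ps := PySem.List.sorted (works.filter (fun w => decide (0 < w))) (fun x => x) true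
  let r := altFind n ps 0 0
  let m := r.1
  let k := r.2.1
  let P := r.2.2
  let base := (works.filter (fun w => decide (w < m))).foldl (fun a w => a + w * w) 0
  if m = 0 then base
  else
    let extra := n - (P - k * m)
    base + (k - extra) * m * m + extra * (m - 1) * (m - 1)

-- ===== PRECONDITION & SPEC =====
-- Pre_ excludes exactly the inputs where A raises: n < 0 or works empty or all
-- elements negative (there maxAmout is never bound / max([]) fails).
def Pre_solution (n : Int) (works : List Int) : Prop :=
  0 ≤ n ∧ works.any (fun w => decide (0 ≤ w)) = true
instance (n : Int) (works : List Int) : Decidable (Pre_solution n works) := by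
  unfold Pre_solution; infer_instance

def pvWitness_solution : Int × List Int := (3, [4, 1])

def Spec_solution (n : Int) (works : List Int) (out : Int) : Prop := out = solution_alt n works
instance (n : Int) (works : List Int) (out : Int) : Decidable (Spec_solution n works out) := by
  unfold Spec_solution; infer_instance

-- ===== CLAIM (what is proved, stated in full; the proofs are below) =====
def Claim_equal_solution : Prop := ∀ (n : Int) (works : List Int), Dom_solution n works → Pre_solution n works → Spec_solution n works (solution n works)

-- ===== LEMMAS AND PROOFS =====

-- the remaining-work function both programs search: sum of (w - t) over w ≥ t
def pvCost (ws : List Int) (t : Int) : Int := (ws.map (fun w => if t ≤ w then w - t else 0)).sum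

-- "m is the least feasible cap": what both searches compute
def pvIsLF (n : Int) (works : List Int) (m : Int) : Prop :=
  0 ≤ m ∧ pvCost works m ≤ n ∧ ∀ t, 0 ≤ t → t < m → n < pvCost works t

theorem pvCost_nil (t : Int) : pvCost [] t = 0 := rfl

theorem pvCost_cons (w t : Int) (ws : List Int) :
    pvCost (w :: ws) t = (if t ≤ w then w - t else 0) + pvCost ws t := by
  simp [pvCost]

theorem pvCost_antitone (ws : List Int) {t t' : Int} (h : t ≤ t') :
    pvCost ws t' ≤ pvCost ws t := by
  induction ws with
  | nil => simp [pvCost_nil]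
  | cons w ws ih => rw [pvCost_cons, pvCost_cons]; split_ifs <;> omega

theorem pvCost_zero_of_le (ws : List Int) (t : Int) (h : ∀ w ∈ ws, w ≤ t) :
    pvCost ws t = 0 := by
  induction ws with
  | nil => rfl
  | cons w ws ih =>
    rw [pvCost_cons, ih (fun x hx => h x (List.mem_cons_of_mem _ hx))]
    have := h w List.mem_cons_self
    split_ifs <;> omega

theorem pvCost_pred (ws : List Int) (m : Int) :
    pvCost ws (m - 1) = pvCost ws m + (ws.countP (fun w => decide (m ≤ w)) : Int) := by
  induction ws with
  | nil => simp [pvCost_nil]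
  | cons w ws ih =>
    rw [pvCost_cons, pvCost_cons, List.countP_cons, ih]
    by_cases h : m ≤ w
    · simp [h, show m - 1 ≤ w by omega]; ring
    · by_cases h2 : m - 1 ≤ w
      · simp [h, h2, show w - (m-1) = 0 by omega]
      · simp [h, h2]

theorem pvCost_perm {l₁ l₂ : List Int} (h : l₁.Perm l₂) (t : Int) :
    pvCost l₁ t = pvCost l₂ t := by
  unfold pvCost; exact (h.map _).sum_eq

theorem pvCost_filter_pos (ws : List Int) (t : Int) (ht : 0 ≤ t) :
    pvCost ws t = pvCost (ws.filter (fun w => decide (0 < w))) t := by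
  induction ws with
  | nil => rfl
  | cons w ws ih =>
    rw [pvCost_cons, List.filter_cons]
    by_cases h : 0 < w
    · simp only [h, decide_true, if_true, pvCost_cons, ih]
    · have : ¬ (t ≤ w) ∨ w - t = 0 := by omega
      rcases this with h2 | h2 <;> simp [h, h2, ih]

theorem pvCost_linear (pre rest : List Int) (t : Int)
    (h1 : ∀ w ∈ pre, t ≤ w) (h2 : ∀ w ∈ rest, w ≤ t) :
    pvCost (pre ++ rest) t = pre.sum - pre.length * t := by
  induction pre with
  | nil => simp [pvCost_zero_of_le rest t h2]
  | cons w pre ih =>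
    rw [List.cons_append, pvCost_cons,
      ih (fun x hx => h1 x (List.mem_cons_of_mem _ hx))]
    have := h1 w List.mem_cons_self
    simp only [this, if_pos, List.length_cons, List.sum_cons]
    push_cast; ring

theorem pvIsLF_unique {n : Int} {works : List Int} {m₁ m₂ : Int}
    (h₁ : pvIsLF n works m₁) (h₂ : pvIsLF n works m₂) : m₁ = m₂ := by
  obtain ⟨a1, b1, c1⟩ := h₁; obtain ⟨a2, b2, c2⟩ := h₂
  rcases lt_trichotomy m₁ m₂ with h | h | h
  · exact absurd b1 (by have := c2 m₁ a1 h; omega)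
  · exact h
  · exact absurd b2 (by have := c1 m₂ a2 h; omega)

theorem costFold (ws : List Int) (mid a : Int) :
    ws.foldl (fun usedT amount => if mid ≤ amount then usedT + (amount - mid) else usedT) a
      = a + pvCost ws mid := by
  induction ws generalizing a with
  | nil => simp [pvCost_nil]
  | cons w ws ih =>
    rw [List.foldl_cons, ih, pvCost_cons]
    split_ifs <;> ring

theorem solnBS_spec (n : Int) (works : List Int) :
    ∀ (meas : Nat) (left right : Int) (acc : Option Int),
    (right + 1 - left).toNat = meas →
    0 ≤ left → left ≤ right + 1 →
    (∀ t, 0 ≤ t → t < left → n < pvCost works t) →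
    (∀ a, acc = some a → a = right + 1 ∧ pvCost works a ≤ n) →
    (acc = none → 0 ≤ right ∧ pvCost works right ≤ n) →
    ∃ m, solnBS n works left right acc = some m ∧ pvIsLF n works m := by
  intro meas
  induction meas using Nat.strong_induction_on with
  | _ meas ih =>
    intro left right acc hmeas h0 hlr h1 hsome hnone
    rw [solnBS]
    by_cases hc : left ≤ right
    · rw [dif_pos hc]
      have hb := PySem.Int.floordiv_two_mid_bounds hc
      simp only [costFold, zero_add]
      by_cases hfeas : pvCost works (PySem.Int.floordiv (left + right) 2) ≤ n
      · rw [if_pos hfeas]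
        refine ih ((PySem.Int.floordiv (left + right) 2) - 1 + 1 - left).toNat
          (by omega) left _ _ rfl h0 (by omega) h1 ?_ (by intro h; cases h)
        intro a ha
        injection ha with ha
        subst ha
        exact ⟨by omega, hfeas⟩
      · rw [if_neg hfeas]
        refine ih (right + 1 - ((PySem.Int.floordiv (left + right) 2) + 1)).toNat
          (by omega) _ right acc rfl (by omega) (by omega) ?_ hsome hnone
        intro t ht htm
        by_cases htl : t < left
        · exact h1 t ht htl
        · calc n < pvCost works (PySem.Int.floordiv (left + right) 2) := by omega
            _ ≤ pvCost works t := pvCost_antitone works (by omega)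
    · rw [dif_neg hc]
      match acc, hsome, hnone with
      | none, _, hnone =>
        exfalso
        obtain ⟨hr0, hrf⟩ := hnone rfl
        exact absurd hrf (by have := h1 right hr0 (by omega); omega)
      | some a, hsome, _ =>
        obtain ⟨ha, hf⟩ := hsome a rfl
        refine ⟨a, rfl, by omega, hf, ?_⟩
        intro t ht htl
        exact h1 t ht (by omega)

theorem countP_works_ps (works : List Int) (m : Int) (hm : 1 ≤ m) :
    works.countP (fun w => decide (m ≤ w)) = (works.filter (fun w => decide (0 < w))).countP (fun w => decide (m ≤ w)) := by
  rw [List.countP_filter]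
  congr 1; funext w
  by_cases h : m ≤ w
  · simp [h, show (0:Int) < w by omega]
  · simp [h]

theorem countP_split (pre rest : List Int) (m : Int)
    (h1 : ∀ w ∈ pre, m ≤ w) (h2 : ∀ w ∈ rest, w < m) :
    (pre ++ rest).countP (fun w => decide (m ≤ w)) = pre.length := by
  rw [List.countP_append]
  have e1 : pre.countP (fun w => decide (m ≤ w)) = pre.length := by
    rw [List.countP_eq_length]; intro a ha; simpa using h1 a ha
  have e2 : rest.countP (fun w => decide (m ≤ w)) = 0 := by
    rw [List.countP_eq_zero]; intro a ha; simpa using (by have := h2 a ha; omega : ¬ m ≤ a)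
  omega

theorem altFind_spec (n : Int) (works ps : List Int)
    (hps : List.Pairwise (fun a b => b ≤ a) ps) (hpos : ∀ w ∈ ps, 0 < w)
    (hperm : ps.Perm (works.filter (fun w => decide (0 < w))))
    (hc : ∀ t, 0 ≤ t → pvCost works t = pvCost ps t) :
    ∀ (rest pre : List Int) (i P : Int) (res : Int × Int × Int),
    ps = pre ++ rest → i = (pre.length : Int) → P = pre.sum →
    (∀ t, rest.headD 0 ≤ t → pvCost works t ≤ n) →
    altFind n rest i P = res →
    pvIsLF n works res.1 ∧
      (res.1 ≠ 0 →
        res.2.1 = (works.countP (fun w => decide (res.1 ≤ w)) : Int) ∧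
        res.2.2 - res.2.1 * res.1 = pvCost works res.1) := by
  intro rest
  induction rest with
  | nil =>
    intro pre i P res hpre hi hP hinv hres
    rw [altFind] at hres
    subst hres
    exact ⟨⟨le_refl 0, hinv 0 (by simp), fun t ht htl => absurd htl (by omega)⟩,
      fun h => absurd rfl h⟩
  | cons p rest' ihr =>
    intro pre i P res hpre hi hP hinv hres
    have hfeas_p : pvCost works p ≤ n := hinv p (by simp)
    have hp_pos : 0 < p := hpos p (hpre ▸ List.mem_append_right pre List.mem_cons_self)
    have hps' : ps = (pre ++ [p]) ++ rest' := by rw [hpre, List.append_cons]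
    have hsplit := (List.pairwise_append.1 (hps' ▸ hps))
    have hpre_ge_p : ∀ w ∈ pre ++ [p], p ≤ w := by
      intro w hw
      rcases List.mem_append.1 hw with hw | hw
      · exact (List.pairwise_append.1 (hpre ▸ hps)).2.2 w hw p List.mem_cons_self
      · simp at hw; omega
    have hrest_desc : List.Pairwise (fun a b => b ≤ a) (p :: rest') :=
      (List.pairwise_append.1 (hpre ▸ hps)).2.1
    have hrest_le_p : ∀ w ∈ rest', w ≤ p := fun w hw => (List.pairwise_cons.1 hrest_desc).1 w hw
    rw [altFind] at hres
    set lo : Int := rest'.headD 0 with hlo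
    have hlo_facts : 0 ≤ lo ∧ lo ≤ p ∧ ∀ w ∈ rest', w ≤ lo := by
      cases rest' with
      | nil =>
        simp only [List.headD_nil] at hlo
        exact ⟨by omega, by omega, by simp⟩
      | cons q tl =>
        simp only [List.headD_cons] at hlo
        have hq : 0 < q := hpos q (hps' ▸ List.mem_append_right _ List.mem_cons_self)
        have hqp : q ≤ p := hrest_le_p q List.mem_cons_self
        refine ⟨by omega, by omega, ?_⟩
        intro w hw
        rcases List.mem_cons.1 hw with rfl | hw
        · omega
        · have := (List.pairwise_cons.1 hsplit.2.1).1 w hw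
          omega
    obtain ⟨hlo0, hlo_le_p, hrest_le_lo⟩ := hlo_facts
    have hlen : ((pre ++ [p]).length : Int) = i + 1 := by simp [hi]
    have hsum : (pre ++ [p]).sum = P + p := by simp [hP]
    -- cost is linear on this segment
    have hcost_seg : ∀ t, 0 ≤ t → t ≤ p → (∀ w ∈ rest', w ≤ t) →
        pvCost works t = (P + p) - (i + 1) * t := by
      intro t ht htp hrt
      rw [hc t ht, hps', pvCost_linear (pre ++ [p]) rest' t
        (fun w hw => le_trans htp (hpre_ge_p w hw)) hrt, hsum, hlen]
    have hcost_lo : pvCost works lo = (P + p) - (i + 1) * lo :=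
      hcost_seg lo hlo0 hlo_le_p hrest_le_lo
    have hcost_p : pvCost works p = (P + p) - (i + 1) * p :=
      hcost_seg p (by omega) (le_refl p) hrest_le_p
    have hi1 : (0 : Int) < i + 1 := by rw [hi]; positivity
    by_cases hbr : n < P + p - (i + 1) * lo
    · rw [if_pos hbr] at hres
      subst hres
      set m : Int := -(PySem.Int.floordiv (n - (P + p)) (i + 1)) with hm
      have hbk : (m - 1) * (i + 1) < (P + p) - n ∧ (P + p) - n ≤ m * (i + 1) := by
        refine (PySem.Int.neg_floordiv_neg_eq_iff_of_pos hi1).1 ?_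
        rw [hm, show -((P + p) - n) = n - (P + p) by ring]
      have hm_gt_lo : lo < m := by nlinarith [hbk.1, hbk.2]
      have hm_le_p : m ≤ p := by nlinarith [hbk.1, hcost_p, hfeas_p]
      have hcost_m : pvCost works m = (P + p) - (i + 1) * m :=
        hcost_seg m (by omega) hm_le_p (fun w hw => le_trans (hrest_le_lo w hw) (by omega))
      have hcost_m1 : pvCost works (m - 1) = (P + p) - (i + 1) * (m - 1) :=
        hcost_seg (m - 1) (by omega) (by omega) (fun w hw => le_trans (hrest_le_lo w hw) (by omega))
      have hLF : pvIsLF n works m := by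
        refine ⟨by omega, by nlinarith [hbk.2, hcost_m], ?_⟩
        intro t ht htm
        calc n < pvCost works (m - 1) := by nlinarith [hbk.1, hcost_m1]
          _ ≤ pvCost works t := pvCost_antitone works (by omega)
      refine ⟨hLF, fun _ => ⟨?_, ?_⟩⟩
      · show i + 1 = (works.countP (fun w => decide (m ≤ w)) : Int)
        have e1 : works.countP (fun w => decide (m ≤ w)) = ps.countP (fun w => decide (m ≤ w)) := by
          rw [countP_works_ps works m (by omega)]
          exact (hperm.countP_eq _).symm
        have e2 : ps.countP (fun w => decide (m ≤ w)) = (pre ++ [p]).length := by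
          rw [hps']
          exact countP_split _ _ m (fun w hw => le_trans hm_le_p (hpre_ge_p w hw))
            (fun w hw => by have := hrest_le_lo w hw; omega)
        rw [e1, e2, hlen]
      · show P + p - (i + 1) * m = pvCost works m
        rw [hcost_m]
    · rw [if_neg hbr] at hres
      refine ihr (pre ++ [p]) (i + 1) (P + p) res hps' (by rw [hlen]) hsum.symm ?_ hres
      intro t ht
      calc pvCost works t ≤ pvCost works lo := pvCost_antitone works (hlo ▸ ht)
        _ ≤ n := by omega

-- A's clamp loop as a fold
theorem clampFold (m : Int) (works : List Int) (a : Int) (l : List Int) :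
    works.foldl (fun (p : Int × List Int) w =>
      if m ≤ w then (p.1 + (w - m), p.2 ++ [m]) else (p.1, p.2 ++ [w])) (a, l)
    = (a + pvCost works m, l ++ works.map (fun w => if m ≤ w then m else w)) := by
  induction works generalizing a l with
  | nil => simp [pvCost_nil]
  | cons w ws ih =>
    rw [List.foldl_cons]
    by_cases h : m ≤ w
    · simp only [h, if_pos, ih, List.map_cons, pvCost_cons]
      refine Prod.ext ?_ ?_
      · simp; ring
      · simp
    · simp only [h, ih, List.map_cons, pvCost_cons, if_false]
      refine Prod.ext ?_ ?_
      · simp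
      · simp

theorem perm_clamp (m : Int) (works : List Int) :
    (works.map (fun w => if m ≤ w then m else w)).Perm
      (List.replicate (works.countP (fun w => decide (m ≤ w))) m ++ works.filter (fun w => decide (w < m))) := by
  induction works with
  | nil => simp
  | cons w ws ih =>
    rw [List.map_cons, List.countP_cons, List.filter_cons]
    by_cases h : m ≤ w
    · have : ¬ (w < m) := by omega
      simp only [h, if_pos, decide_true, this, decide_false]
      rw [List.replicate_succ]
      exact (ih.cons m)
    · have hw : w < m := by omega
      simp only [h, decide_false, hw, decide_true]
      exact (ih.cons w).trans List.perm_middle.symm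

theorem sorted_clamp (m : Int) (works : List Int) :
    PySem.List.sorted (works.map (fun w => if m ≤ w then m else w)) (fun x => x) true
      = List.replicate (works.countP (fun w => decide (m ≤ w))) m
        ++ PySem.List.sorted (works.filter (fun w => decide (w < m))) (fun x => x) true := by
  apply PySem.List.eq_of_perm_of_pairwise_le_of_injective (fun x : Int => -x) neg_injective
  · exact ((PySem.List.sorted_perm _ _ _).trans (perm_clamp m works)).trans
      ((PySem.List.sorted_perm _ _ _).symm.append_left _)
  · exact (PySem.List.sorted_pairwise_rev _ _).imp (by intro a b h; omega)
  · rw [List.pairwise_append]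
    refine ⟨?_, (PySem.List.sorted_pairwise_rev _ _).imp (by intro a b h; omega), ?_⟩
    · exact List.pairwise_replicate.mpr (Or.inr le_rfl)
    · intro a ha b hb
      have ha' := List.eq_of_mem_replicate ha
      have hb' : b < m := by
        have := (PySem.List.mem_sorted _ _ _ _).1 hb
        have := List.of_mem_filter this
        simpa using this
      subst ha'
      omega

theorem solnDec_id (l : List Int) (t : Int) (h : ∀ w ∈ l, w ≤ 0) : solnDec l t = l := by
  induction l with
  | nil => rfl
  | cons w ws ih =>
    rw [solnDec]
    have hw := h w List.mem_cons_self
    split_ifs with h1 h2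
    · omega
    · rw [ih (fun x hx => h x (List.mem_cons_of_mem _ hx))]
    · rfl

theorem solnDec_replicate (m : Int) (S : List Int) :
    ∀ (c : Nat) (t : Int), 0 < m → 0 ≤ t → t < (c : Int) →
    solnDec (List.replicate c m ++ S) t
      = List.replicate t.toNat (m - 1) ++ List.replicate (c - t.toNat) m ++ S := by
  intro c
  induction c with
  | zero => intro t _ _ h; simp at h; omega
  | succ c ih =>
    intro t hm ht hc
    rw [List.replicate_succ, List.cons_append, solnDec]
    by_cases h : 0 < t
    · simp only [h, if_pos, hm, if_pos]
      rw [ih (t - 1) hm (by omega) (by push_cast at hc ⊢; omega)]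
      rw [show t.toNat = (t - 1).toNat + 1 by omega,
        show c + 1 - ((t - 1).toNat + 1) = c - (t - 1).toNat by omega,
        List.replicate_succ, List.cons_append]
      simp [List.append_assoc]
    · have : t = 0 := by omega
      simp [this, List.replicate_succ]

theorem solution_eq (n : Int) (works : List Int) (h : Pre_solution n works) :
    solution n works = solution_alt n works := by
  obtain ⟨hn, hany⟩ := h
  obtain ⟨w0, hw0mem, hw0⟩ := List.any_eq_true.1 hany
  have hw0' : (0 : Int) ≤ w0 := of_decide_eq_true hw0
  have hne : works ≠ [] := by intro e; subst e; cases hw0mem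
  obtain ⟨mx, hmx⟩ : ∃ mx, PySem.List.max? works (fun x => x) = some mx := by
    cases hmax : PySem.List.max? works (fun x => x) with
    | none => exact absurd ((PySem.List.max?_eq_none_iff _ _).1 hmax) hne
    | some mx => exact ⟨mx, rfl⟩
  have hmax_ub : ∀ y ∈ works, y ≤ mx := PySem.List.max?_isMax hmx
  have hmx0 : (0 : Int) ≤ mx := le_trans hw0' (hmax_ub w0 hw0mem)
  have hcost_mx : pvCost works mx = 0 := pvCost_zero_of_le works mx hmax_ub
  obtain ⟨mA, hbs, hLFA⟩ := solnBS_spec n works (mx + 1 - 0).toNat 0 mx none rfl (le_refl 0)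
    (by omega) (fun t ht htl => absurd htl (by omega)) (fun a ha => by cases ha)
    (fun _ => ⟨hmx0, by rw [hcost_mx]; exact hn⟩)
  set ps := PySem.List.sorted (works.filter (fun w => decide (0 < w))) (fun x => x) true with hps_def
  have hperm : ps.Perm (works.filter (fun w => decide (0 < w))) := PySem.List.sorted_perm _ _ _
  have hpair : List.Pairwise (fun a b => b ≤ a) ps := PySem.List.sorted_pairwise_rev _ _
  have hpos : ∀ w ∈ ps, 0 < w := by
    intro w hw
    have h1 := (PySem.List.mem_sorted _ _ _ _).1 hw
    have h2 := List.of_mem_filter h1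
    simpa using h2
  have hc : ∀ t, 0 ≤ t → pvCost works t = pvCost ps t := by
    intro t ht
    rw [pvCost_filter_pos works t ht]
    exact (pvCost_perm hperm t).symm
  have hinv : ∀ t, ps.headD 0 ≤ t → pvCost works t ≤ n := by
    cases hpcase : ps with
    | nil =>
      intro t ht
      simp only [List.headD_nil] at ht
      rw [hc t ht, hpcase, pvCost_nil]
      exact hn
    | cons q tl =>
      intro t ht
      simp only [List.headD_cons] at ht
      have hq : 0 < q := hpos q (hpcase ▸ List.mem_cons_self)
      have ht0 : (0 : Int) ≤ t := by omega
      rw [hc t ht0, pvCost_zero_of_le ps t ?_]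
      · exact hn
      · intro w hw
        rw [hpcase] at hw
        rcases List.mem_cons.1 hw with rfl | hw
        · omega
        · have := (List.pairwise_cons.1 (hpcase ▸ hpair)).1 w hw
          omega
  obtain ⟨hLFB, hkP⟩ := altFind_spec n works ps hpair hpos hperm hc ps [] 0 0
    (altFind n ps 0 0) (by simp) (by simp) (by simp) hinv rfl
  have hAB : mA = (altFind n ps 0 0).1 := pvIsLF_unique hLFA hLFB
  -- the two phase-2 ingredients, in terms of mA
  have hA : solution n works =
      (solnDec (List.replicate (works.countP (fun w => decide (mA ≤ w))) mA
          ++ PySem.List.sorted (works.filter (fun w => decide (w < mA))) (fun x => x) true)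
        (n - pvCost works mA)).foldl (fun answer w => answer + w ^ 2) 0 := by
    unfold solution
    simp only [hmx, hbs, clampFold, List.nil_append, sorted_clamp, zero_add]
  have hB : solution_alt n works =
      if (altFind n ps 0 0).1 = 0 then
        (works.filter (fun w => decide (w < (altFind n ps 0 0).1))).foldl (fun a w => a + w * w) 0
      else
        (works.filter (fun w => decide (w < (altFind n ps 0 0).1))).foldl (fun a w => a + w * w) 0
          + ((altFind n ps 0 0).2.1 - (n - ((altFind n ps 0 0).2.2 - (altFind n ps 0 0).2.1 * (altFind n ps 0 0).1))) * (altFind n ps 0 0).1 * (altFind n ps 0 0).1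
          + (n - ((altFind n ps 0 0).2.2 - (altFind n ps 0 0).2.1 * (altFind n ps 0 0).1)) * ((altFind n ps 0 0).1 - 1) * ((altFind n ps 0 0).1 - 1) := by
    rw [solution_alt, hps_def]
  rw [hA, hB, ← hAB]
  by_cases hm0 : mA = 0
  · rw [if_pos hm0]
    subst hm0
    rw [solnDec_id]
    · rw [PySem.List.foldl_add, PySem.List.foldl_add, List.map_append, List.sum_append,
        List.map_replicate]
      simp only [pow_two]
      rw [((PySem.List.sorted_perm _ _ _).map (fun w => w * w)).sum_eq]
      simp
    · intro w hw
      rcases List.mem_append.1 hw with hw | hw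
      · have := List.eq_of_mem_replicate hw; omega
      · have h1 := (PySem.List.mem_sorted _ _ _ _).1 hw
        have h2 := List.of_mem_filter h1
        simp at h2; omega
  · rw [if_neg hm0]
    obtain ⟨hk, hP⟩ := hkP (by rw [← hAB]; exact hm0)
    rw [← hAB] at hk hP
    obtain ⟨hm0', hfeas, hlt⟩ := hLFA
    have hmpos : 0 < mA := by omega
    have hcnt := pvCost_pred works mA
    have hinfeas : n < pvCost works (mA - 1) := hlt (mA - 1) (by omega) (by omega)
    have hleft0 : 0 ≤ n - pvCost works mA := by omega
    have hleftlt : n - pvCost works mA < (works.countP (fun w => decide (mA ≤ w)) : Int) := by omega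
    rw [solnDec_replicate mA _ _ _ hmpos hleft0 hleftlt]
    rw [PySem.List.foldl_add, PySem.List.foldl_add]
    simp only [List.map_append, List.sum_append, List.map_replicate, List.sum_replicate,
      nsmul_eq_mul, pow_two, zero_add]
    rw [((PySem.List.sorted_perm (works.filter (fun w => decide (w < mA))) (fun x => x) true).map
      (fun w => w * w)).sum_eq]
    rw [hk] at hP ⊢
    have h22 : (altFind n ps 0 0).2.2
        = pvCost works mA + (works.countP (fun w => decide (mA ≤ w)) : Int) * mA := by
      linarith [hP]
    rw [h22]
    have e1 : ((n - pvCost works mA).toNat : Int) = n - pvCost works mA := by omega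
    have e2 : ((works.countP (fun w => decide (mA ≤ w)) - (n - pvCost works mA).toNat : Nat) : Int)
        = (works.countP (fun w => decide (mA ≤ w)) : Int) - (n - pvCost works mA) := by omega
    rw [e1, e2]
    ring

-- ===== VERDICT (by name: the statement is the Claim_ definition above) =====
theorem solution_spec : Claim_equal_solution := by
  intro n works _ hpre
  unfold Spec_solution
  exact solution_eq n works hpre
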